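-- pv_equiv track=rewrite | github.com/TonikX/analytics_backend | application/workprogramsapp/disciplineblockmodules/ze_module_logic.py | generate_full_ze_list
-- ===== SOURCE A (Python) =====
-- def ze_cutter(ze_wp):
--     break_point = -1
--     for i in range(len(ze_wp)):
--         if ze_wp[i] != 0:
--             break_point = i
--             break
--     if break_point != -1:
--         return ze_wp[break_point:]
--     else:
--         return []
--
-- def generate_full_ze_list(ze_wp, semesters):
--     possible_terms = []
--     ze_wp = ze_cutter(ze_wp)
--     for sem in semesters:
--         list_of_ze = [0 for _ in range(10)]
--         terms_counter = 0
--         for i in range(10):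
--             if sem <= i + 1 < sem + len(ze_wp):
--                 list_of_ze[i] = ze_wp[terms_counter]
--                 terms_counter += 1
--         possible_terms.append(list_of_ze)
--     if possible_terms:
--         return possible_terms
--     else:
--         return [[0 for _ in range(10)]]
-- ===== SOURCE B (Python) =====
-- def generate_full_ze_list(ze_wp, semesters):
--     # strip leading zeros (empty if all zeros)
--     k = 0
--     while k < len(ze_wp) and ze_wp[k] == 0:
--         k += 1
--     ze = ze_wp[k:]
--     rows = []
--     for sem in semesters:
--         start = max(0, sem - 1)
--         end = min(10, sem - 1 + len(ze))
--         if end > start: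
--             rows.append([0] * start + ze[:end - start] + [0] * (10 - end))
--         else:
--             rows.append([0] * 10)
--     return rows if rows else [[0] * 10]
-- ===== Notes on version B (the rewrite author's own statement) =====
-- stated objective: simpler
-- what changed: Replaces A's per-semester 10-iteration interpreted scan with terms_counter state (and A's index-hunting ze_cutter) by a direct window computation: clamp start/end once and build each row as one slice concatenation [0]*start + ze[:end-start] + [0]*(10-end).
import Mathlib
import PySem

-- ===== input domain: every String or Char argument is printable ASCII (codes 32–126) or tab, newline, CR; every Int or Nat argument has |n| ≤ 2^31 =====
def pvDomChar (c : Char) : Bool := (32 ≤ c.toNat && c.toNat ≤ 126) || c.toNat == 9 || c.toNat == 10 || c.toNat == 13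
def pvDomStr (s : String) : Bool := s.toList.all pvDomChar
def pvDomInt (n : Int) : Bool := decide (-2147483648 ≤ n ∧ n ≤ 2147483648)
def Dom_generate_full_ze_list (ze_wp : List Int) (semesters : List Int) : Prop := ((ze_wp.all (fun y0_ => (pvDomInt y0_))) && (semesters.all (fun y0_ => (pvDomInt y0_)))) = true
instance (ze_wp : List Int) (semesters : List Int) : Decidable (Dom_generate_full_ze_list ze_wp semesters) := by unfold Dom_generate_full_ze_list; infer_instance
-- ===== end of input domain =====

-- B replaces A's 10-iteration scan with terms_counter by a direct window computation
-- (start/end clamp plus one slice concatenation); objective: simpler. Proven equal on all inputs.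

-- ===== PORT A =====
-- 'break_point = -1; for i in range(len(ze_wp)): if ze_wp[i] != 0: break_point = i; break'
def pvBreakPoint : List Int → Nat → Int
  | [], _ => -1
  | x :: xs, i => if x ≠ 0 then (i : Int) else pvBreakPoint xs (i + 1)

def ze_cutter (ze_wp : List Int) : List Int :=
  let break_point := pvBreakPoint ze_wp 0
  if break_point ≠ -1 then PySem.List.slice ze_wp (some break_point) none else []

-- inner 'for i in range(10)' loop of A, state = (list_of_ze, terms_counter)
def pvRowA (ze_wp : List Int) (sem : Int) : List Int :=
  ((PySem.List.pyRange 0 10 1).foldl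
    (fun (st : List Int × Int) i =>
      if sem ≤ i + 1 ∧ i + 1 < sem + (ze_wp.length : Int) then
        (PySem.List.pySetD st.1 i (PySem.List.pyGetD ze_wp st.2 0), st.2 + 1)
      else st)
    (List.replicate 10 0, 0)).1

def generate_full_ze_list (ze_wp : List Int) (semesters : List Int) : List (List Int) :=
  let ze := ze_cutter ze_wp
  let possible_terms := semesters.map (fun sem => pvRowA ze sem)
  if possible_terms ≠ [] then possible_terms else [List.replicate 10 0]

-- ===== PORT B =====
-- 'k = 0; while k < len(ze_wp) and ze_wp[k] == 0: k += 1; ze = ze_wp[k:]'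
def pvDropZeros : List Int → List Int
  | [] => []
  | x :: xs => if x = 0 then pvDropZeros xs else x :: xs

-- per-semester row of B: window [start, stop) filled from ze[:stop-start]
def pvRowB (ze : List Int) (sem : Int) : List Int :=
  let start := max 0 (sem - 1)
  let stop := min 10 (sem - 1 + (ze.length : Int))
  if start < stop then
    List.replicate start.toNat 0 ++ PySem.List.slice ze none (some (stop - start))
      ++ List.replicate (10 - stop).toNat 0
  else
    List.replicate 10 0

def generate_full_ze_list_alt (ze_wp : List Int) (semesters : List Int) : List (List Int) :=
  let ze := pvDropZeros ze_wp
  let rows := semesters.map (fun sem => pvRowB ze sem)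
  if rows ≠ [] then rows else [List.replicate 10 0]

-- ===== PRECONDITION & SPEC =====
def Spec_generate_full_ze_list (ze_wp : List Int) (semesters : List Int) (out : List (List Int)) : Prop := out = generate_full_ze_list_alt ze_wp semesters
instance (ze_wp : List Int) (semesters : List Int) (out : List (List Int)) : Decidable (Spec_generate_full_ze_list ze_wp semesters out) := by unfold Spec_generate_full_ze_list; infer_instance

-- ===== CLAIM (what is proved, stated in full; the proofs are below) =====
def Claim_equal_generate_full_ze_list : Prop := ∀ (ze_wp : List Int) (semesters : List Int), Dom_generate_full_ze_list ze_wp semesters → Spec_generate_full_ze_list ze_wp semesters (generate_full_ze_list ze_wp semesters)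

-- ===== LEMMAS AND PROOFS =====

-- canonical form of one semester row
def pvCanon (ze : List Int) (sem : Int) : List Int :=
  (List.range 10).map (fun (i : Nat) =>
    if sem - 1 ≤ (i : Int) ∧ (i : Int) < min 10 (sem - 1 + (ze.length : Int)) then
      PySem.List.pyGetD ze ((i : Int) - max 0 (sem - 1)) 0
    else 0)

lemma bp_shift (xs : List Int) : ∀ i : Nat,
    pvBreakPoint xs (i + 1) = if pvBreakPoint xs i = -1 then -1 else pvBreakPoint xs i + 1 := by
  induction xs with
  | nil => intro i; simp [pvBreakPoint]
  | cons x xs ih =>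
    intro i
    by_cases hx : x = 0
    · simp only [pvBreakPoint, hx, ne_eq, not_true_eq_false, if_false]
      exact ih (i + 1)
    · simp only [pvBreakPoint, hx, ne_eq, not_false_eq_true, if_true]
      have : ((i : Int)) ≠ -1 := by omega
      simp [this]

lemma bp_nonneg (xs : List Int) : ∀ i : Nat,
    pvBreakPoint xs i = -1 ∨ (i : Int) ≤ pvBreakPoint xs i := by
  induction xs with
  | nil => intro i; left; rfl
  | cons x xs ih =>
    intro i
    by_cases hx : x = 0
    · simp only [pvBreakPoint, hx, ne_eq, not_true_eq_false, if_false]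
      rcases ih (i + 1) with h | h
      · left; exact h
      · right; push_cast at h ⊢; omega
    · right; simp [pvBreakPoint, hx]

lemma cut_eq (ze : List Int) : ze_cutter ze = pvDropZeros ze := by
  induction ze with
  | nil => rfl
  | cons x xs ih =>
    by_cases hx : x = 0
    · have hsh := bp_shift xs 0
      by_cases hbp : pvBreakPoint xs 0 = -1
      · have : pvBreakPoint (x :: xs) 0 = -1 := by
          simp [pvBreakPoint, hx, hsh, hbp]
        simp only [ze_cutter, this, ne_eq, not_true_eq_false, if_false]
        have : ze_cutter xs = [] := by simp [ze_cutter, hbp]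
        simp [pvDropZeros, hx, ← ih, this]
    
      · have hge : (0 : Int) ≤ pvBreakPoint xs 0 := by
          rcases bp_nonneg xs 0 with h | h
          · exact absurd h hbp
          · exact_mod_cast h
        have hbp1 : pvBreakPoint (x :: xs) 0 = pvBreakPoint xs 0 + 1 := by
          simp [pvBreakPoint, hx, hsh, hbp]
        have hne : pvBreakPoint xs 0 + 1 ≠ -1 := by omega
        simp only [ze_cutter, hbp1, ne_eq, hne, not_false_eq_true, if_true]
        have h1 : pvBreakPoint xs 0 + 1 = ((pvBreakPoint xs 0).toNat + 1 : Nat) := by omega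
        have h0 : pvBreakPoint xs 0 = (((pvBreakPoint xs 0).toNat : Nat) : Int) := by omega
        rw [h1, PySem.List.slice_from_natCast]
        simp only [List.drop_succ_cons]
        have : pvDropZeros (x :: xs) = pvDropZeros xs := by simp [pvDropZeros, hx]
        rw [this, ← ih]
        simp only [ze_cutter, ne_eq, hbp, not_false_eq_true, if_true]
        rw [h0, PySem.List.slice_from_natCast]
        simp
        omega
    · have hbp : pvBreakPoint (x :: xs) 0 = 0 := by simp [pvBreakPoint, hx]
      simp only [ze_cutter, hbp, ne_eq]
      norm_num
      simp [pvDropZeros, hx]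

lemma rowA_inv (ze : List Int) (sem : Int) : ∀ k : Nat, k ≤ 10 →
    ((PySem.List.pyRange 0 k 1).foldl
      (fun (st : List Int × Int) i =>
        if sem ≤ i + 1 ∧ i + 1 < sem + (ze.length : Int) then
          (PySem.List.pySetD st.1 i (PySem.List.pyGetD ze st.2 0), st.2 + 1)
        else st)
      (List.replicate 10 0, 0))
    = ((List.range 10).map (fun (i : Nat) =>
        if sem - 1 ≤ (i : Int) ∧ (i : Int) < min (k : Int) (sem - 1 + (ze.length : Int)) then
          PySem.List.pyGetD ze ((i : Int) - max 0 (sem - 1)) 0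
        else 0),
       max 0 (min (k : Int) (sem - 1 + (ze.length : Int)) - max 0 (sem - 1))) := by
  intro k hk
  induction k with
  | zero =>
    rw [PySem.List.pyRange_one_eq_nil (by omega)]
    simp only [List.foldl_nil, Prod.mk.injEq]
    constructor
    · symm
      rw [List.eq_replicate_iff]
      refine ⟨by simp, ?_⟩
      intro b hb
      simp only [List.mem_map, List.mem_range] at hb
      obtain ⟨i, hi, hb⟩ := hb
      rw [if_neg (by omega)] at hb
      exact hb.symm
    · simp only [Nat.cast_zero]
      omega
  | succ k ih =>
    have hk10 : k ≤ 10 := by omega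
    have ih := ih hk10
    have hcast : (((k + 1 : Nat)) : Int) = (k : Int) + 1 := by push_cast; ring
    rw [hcast, PySem.List.pyRange_one_succ_right (by omega : (0:Int) ≤ (k:Int)), List.foldl_append, ih]
    simp only [List.foldl_cons, List.foldl_nil]
    by_cases hc : sem ≤ (k : Int) + 1 ∧ (k : Int) + 1 < sem + (ze.length : Int)
    · rw [if_pos hc]
      obtain ⟨hc1, hc2⟩ := hc
      rw [Prod.mk.injEq]
      constructor
      · simp only [PySem.List.pySetD_natCast]
        apply List.ext_getElem
        · simp
        · intro j hj hj'
          simp only [List.length_set, List.length_map, List.length_range] at hj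
          rw [List.getElem_set]
          by_cases hjk : k = j
          · subst hjk
            rw [if_pos rfl]
            simp only [List.getElem_map, List.getElem_range]
            rw [if_pos (by constructor <;> omega)]
            congr 1
            omega
          · rw [if_neg hjk]
            simp only [List.getElem_map, List.getElem_range]
            have hiff : (sem - 1 ≤ ((j:Nat) : Int) ∧ ((j:Nat) : Int) < min (k : Int) (sem - 1 + (ze.length : Int)))
                ↔ (sem - 1 ≤ ((j:Nat) : Int) ∧ ((j:Nat) : Int) < min ((k : Int) + 1) (sem - 1 + (ze.length : Int))) := by
              have : ((j:Nat) : Int) ≠ (k : Int) := by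
                intro h; apply hjk; omega
              omega
            by_cases h1 : sem - 1 ≤ ((j:Nat) : Int) ∧ ((j:Nat) : Int) < min (k : Int) (sem - 1 + (ze.length : Int))
            · rw [if_pos h1, if_pos (hiff.mp h1)]
            · rw [if_neg h1, if_neg (fun h => h1 (hiff.mpr h))]
      · omega
    · rw [if_neg hc]
      rw [Prod.mk.injEq]
      constructor
      · apply List.map_congr_left
        intro i hi
        simp only [List.mem_range] at hi
        have hiff : (sem - 1 ≤ ((i:Nat) : Int) ∧ ((i:Nat) : Int) < min (k : Int) (sem - 1 + (ze.length : Int)))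
            ↔ (sem - 1 ≤ ((i:Nat) : Int) ∧ ((i:Nat) : Int) < min ((k : Int) + 1) (sem - 1 + (ze.length : Int))) := by
          omega
        by_cases h1 : sem - 1 ≤ ((i:Nat) : Int) ∧ ((i:Nat) : Int) < min (k : Int) (sem - 1 + (ze.length : Int))
        · rw [if_pos h1, if_pos (hiff.mp h1)]
        · rw [if_neg h1, if_neg (fun h => h1 (hiff.mpr h))]
      · omega

lemma rowA_eq_canon (ze : List Int) (sem : Int) : pvRowA ze sem = pvCanon ze sem := by
  unfold pvRowA pvCanon
  have h := rowA_inv ze sem 10 (by omega)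
  simp only [Nat.cast_ofNat] at h
  rw [h]

lemma rowB_eq_canon (ze : List Int) (sem : Int) : pvRowB ze sem = pvCanon ze sem := by
  unfold pvRowB pvCanon
  set s := max 0 (sem - 1) with hs
  set e := min 10 (sem - 1 + (ze.length : Int)) with he
  by_cases hse : s < e
  · rw [if_pos hse]
    have hes : e - s = (((e - s).toNat : Nat) : Int) := by omega
    rw [hes, PySem.List.slice_to_natCast]
    have hlen : (e - s).toNat ≤ ze.length := by omega
    apply List.ext_getElem
    · simp only [List.length_map, List.length_range, List.length_append,
        List.length_replicate, List.length_take]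
      omega
    · intro j hj hj'
      rw [List.getElem_map, List.getElem_range]
      by_cases h1 : j < s.toNat
      · rw [List.getElem_append_left (by simp; omega), List.getElem_append_left (by simp; omega),
          List.getElem_replicate, if_neg (by omega)]
      · by_cases h2 : j < s.toNat + (e - s).toNat
        · rw [List.getElem_append_left (by simp; omega),
            List.getElem_append_right (by simp; omega)]
          simp only [List.length_replicate]
          rw [List.getElem_take, if_pos (by omega),
            PySem.List.pyGetD_eq_getElem ze (i := (j : Int) - s) 0 (by omega) (by omega)]
          congr 1
          omega
        · rw [List.getElem_append_right (by simp; omega)]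
          simp only [List.length_append, List.length_replicate, List.length_take]
          rw [List.getElem_replicate, if_neg (by omega)]
  · rw [if_neg hse]
    symm
    rw [List.eq_replicate_iff]
    refine ⟨by simp, ?_⟩
    intro b hb
    simp only [List.mem_map, List.mem_range] at hb
    obtain ⟨i, hi, hb⟩ := hb
    rw [if_neg (by omega)] at hb
    exact hb.symm

-- ===== VERDICT (by name: the statement is the Claim_ definition above) =====
theorem generate_full_ze_list_spec : Claim_equal_generate_full_ze_list := by
  intro ze_wp semesters _
  unfold Spec_generate_full_ze_list generate_full_ze_list generate_full_ze_list_alt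
  simp only [cut_eq, rowA_eq_canon, rowB_eq_canon]
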